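-- pv_equiv track=rewrite | github.com/linkaform/modules | jit/items/reports/JIT_Reports/reorder_rules.py | format_catalog_product
-- ===== SOURCE A (Python) =====
-- def format_catalog_product(data_query, id_field):
--     list_response = []
--     for item in data_query:
--         wharehouse = item.get(id_field,'')
--         if wharehouse not in list_response and wharehouse !='':
--             list_response.append(wharehouse)
--
--     list_response.sort()
--     return list_response
-- ===== SOURCE B (Python) =====
-- def format_catalog_product(data_query, id_field):
--     # sort-first, then collapse adjacent duplicates instead of a per-item membership scan
--     vals = [item.get(id_field, '') for item in data_query]
--     vals = [v for v in vals if v != '']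
--     vals.sort()
--     out = []
--     for v in vals:
--         if not out or out[-1] != v:
--             out.append(v)
--     return out
-- ===== Notes on version B (the rewrite author's own statement) =====
-- stated objective: alternative
-- what changed: Replaces A's per-item membership scan over the growing result list by sort-first then a single adjacent-duplicate-collapse pass.
import Mathlib
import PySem

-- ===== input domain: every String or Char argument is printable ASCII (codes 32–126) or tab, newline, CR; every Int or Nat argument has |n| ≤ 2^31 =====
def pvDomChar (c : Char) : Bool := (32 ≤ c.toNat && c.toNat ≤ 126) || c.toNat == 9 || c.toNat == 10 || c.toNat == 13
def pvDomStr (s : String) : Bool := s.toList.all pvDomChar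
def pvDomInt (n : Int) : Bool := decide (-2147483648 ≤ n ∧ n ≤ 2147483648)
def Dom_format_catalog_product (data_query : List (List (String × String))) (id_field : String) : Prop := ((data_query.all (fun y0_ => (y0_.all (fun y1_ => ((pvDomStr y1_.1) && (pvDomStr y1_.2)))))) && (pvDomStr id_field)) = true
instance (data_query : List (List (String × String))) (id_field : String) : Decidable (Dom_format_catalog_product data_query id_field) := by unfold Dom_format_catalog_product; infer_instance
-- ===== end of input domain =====

-- B replaces A's per-item membership scan over the growing result by sort-first
-- then one adjacent-duplicate-collapse pass (objective: alternative algorithm).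

-- ===== PORT A =====
def format_catalog_product (data_query : List (List (String × String))) (id_field : String) : List String :=
  let list_response := data_query.foldl (fun acc item =>
    let wharehouse := (PySem.Dict.mk item).getD id_field ""
    if wharehouse ∉ acc ∧ wharehouse ≠ "" then acc ++ [wharehouse] else acc) []
  PySem.List.sorted list_response (fun x => x) false

-- ===== PORT B =====
def format_catalog_product_alt (data_query : List (List (String × String))) (id_field : String) : List String :=
  let vals := (data_query.map (fun item => (PySem.Dict.mk item).getD id_field "")).filter
    (fun v => v ≠ "")
  let svals := PySem.List.sorted vals (fun x => x) false
  svals.foldl (fun out v => if out = [] ∨ out.getLast? ≠ some v then out ++ [v] else out) []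

-- ===== PRECONDITION & SPEC =====
def Spec_format_catalog_product (data_query : List (List (String × String))) (id_field : String) (out : List String) : Prop := out = format_catalog_product_alt data_query id_field
instance (data_query : List (List (String × String))) (id_field : String) (out : List String) : Decidable (Spec_format_catalog_product data_query id_field out) := by unfold Spec_format_catalog_product; infer_instance

-- ===== CLAIM (what is proved, stated in full; the proofs are below) =====
def Claim_equal_format_catalog_product : Prop := ∀ (data_query : List (List (String × String))) (id_field : String), Dom_format_catalog_product data_query id_field → Spec_format_catalog_product data_query id_field (format_catalog_product data_query id_field)

-- ===== LEMMAS AND PROOFS =====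

-- every element of a strictly increasing list is ≤ its last element
theorem pv_le_getLast {α : Type} [LinearOrder α] :
    ∀ (l : List α), l.Pairwise (· < ·) → ∀ a ∈ l, ∀ (h : l ≠ []), a ≤ l.getLast h := by
  intro l
  induction l with
  | nil => intro _ a ha; cases ha
  | cons b t ih =>
    intro hp a ha h
    cases t with
    | nil => simp at ha; simp [ha]
    | cons c t' =>
      rcases List.mem_cons.mp ha with rfl | hat
      · have hlt : a < (c :: t').getLast (by simp) :=
          (List.pairwise_cons.mp hp).1 _ (List.getLast_mem _)
        simpa [List.getLast_cons] using le_of_lt hlt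
      · have := ih (List.pairwise_cons.mp hp).2 a hat (by simp)
        simpa [List.getLast_cons] using this

-- invariant of B's adjacent-duplicate-collapse fold over a ≤-sorted list
theorem pv_bfold_spec {α : Type} [LinearOrder α] [DecidableEq α] :
    ∀ (s acc : List α), s.Pairwise (· ≤ ·) → acc.Pairwise (· < ·) →
      (∀ a ∈ acc, ∀ y ∈ s, a ≤ y) →
      (List.foldl (fun out v => if out = [] ∨ out.getLast? ≠ some v then out ++ [v] else out) acc s).Pairwise (· < ·) ∧
      (∀ x, x ∈ List.foldl (fun out v => if out = [] ∨ out.getLast? ≠ some v then out ++ [v] else out) acc s ↔ x ∈ acc ∨ x ∈ s) := by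
  intro s
  induction s with
  | nil => intro acc _ hacc _; simpa using hacc
  | cons v t ih =>
    intro acc hs hacc hle
    have hs' := List.pairwise_cons.mp hs
    by_cases hc : acc = [] ∨ acc.getLast? ≠ some v
    · have hltv : ∀ a ∈ acc, a < v := by
        intro a ha
        have hne : acc ≠ [] := by rintro rfl; cases ha
        have hlast : acc.getLast? = some (acc.getLast hne) := List.getLast?_eq_some_getLast hne
        rcases hc with hnil | hgl
        · exact absurd hnil hne
        · have hlv : acc.getLast hne ≠ v := by
            intro hEq; exact hgl (by rw [hlast, hEq])
          have h1 : acc.getLast hne ≤ v := hle _ (List.getLast_mem hne) v (by simp)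
          have h2 : a ≤ acc.getLast hne := pv_le_getLast acc hacc a ha hne
          exact lt_of_le_of_lt h2 (lt_of_le_of_ne h1 hlv)
      have hacc' : (acc ++ [v]).Pairwise (· < ·) := by
        rw [List.pairwise_append]
        exact ⟨hacc, by simp, by simpa using hltv⟩
      have hle' : ∀ a ∈ acc ++ [v], ∀ y ∈ t, a ≤ y := by
        intro a ha y hy
        rcases List.mem_append.mp ha with h | h
        · exact hle a h y (by simp [hy])
        · simp at h; subst h; exact hs'.1 y hy
      have := ih (acc ++ [v]) hs'.2 hacc' hle'
      refine ⟨?_, ?_⟩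
      · simpa [List.foldl_cons, if_pos hc] using this.1
      · intro x
        have hm := this.2 x
        simp only [List.foldl_cons, if_pos hc]
        rw [hm]; simp [List.mem_append, List.mem_cons]; tauto
    · have hc' : acc ≠ [] ∧ acc.getLast? = some v := by
        rw [not_or, not_not] at hc; exact hc
      have hvmem : v ∈ acc := by
        have hne : acc ≠ [] := hc'.1
        have hgl : acc.getLast hne = v := by
          have h0 := List.getLast?_eq_some_getLast hne
          rw [h0] at hc'
          exact Option.some.inj hc'.2
        rw [← hgl]; exact List.getLast_mem hne
      have := ih acc hs'.2 hacc (fun a ha y hy => hle a ha y (by simp [hy]))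
      refine ⟨?_, ?_⟩
      · simpa [List.foldl_cons, if_neg hc] using this.1
      · intro x
        have hm := this.2 x
        simp only [List.foldl_cons, if_neg hc]
        rw [hm]; simp only [List.mem_cons]
        constructor
        · tauto
        · rintro (h | rfl | h)
          exacts [Or.inl h, Or.inl hvmem, Or.inr h]

-- A's accumulation loop IS set(filter ≠ '') in first-occurrence order
theorem pv_afold_eq_ofList (ws : List String) :
    List.foldl (fun acc w => if w ∉ acc ∧ w ≠ "" then acc ++ [w] else acc) ([] : List String) ws
      = PySem.Set.ofList (ws.filter (fun v => v ≠ "")) := by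
  have hstep : ∀ (acc : List String) (w : String),
      (if w ∉ acc ∧ w ≠ "" then acc ++ [w] else acc)
        = if w ≠ "" then PySem.Set.add acc w else acc := by
    intro acc w
    by_cases h1 : w = "" <;> by_cases h2 : w ∈ acc <;>
      simp [PySem.Set.add, h1, h2, List.contains_eq_mem]
  have hfun : (fun (acc : List String) w => if w ∉ acc ∧ w ≠ "" then acc ++ [w] else acc)
      = (fun acc w => if w ≠ "" then PySem.Set.add acc w else acc) :=
    funext fun acc => funext fun w => hstep acc w
  calc List.foldl (fun acc w => if w ∉ acc ∧ w ≠ "" then acc ++ [w] else acc) [] ws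
      = List.foldl (fun acc w => if w ≠ "" then PySem.Set.add acc w else acc) [] ws := by
        rw [hfun]
    _ = List.foldl PySem.Set.add [] (ws.filter (fun v => decide (v ≠ ""))) :=
        PySem.List.foldl_ite_eq_foldl_filter (fun w => w ≠ "") PySem.Set.add ws []
    _ = PySem.Set.ofList (ws.filter (fun v => v ≠ "")) := (PySem.Set.ofList_eq_foldl _).symm

-- ===== VERDICT (by name: the statement is the Claim_ definition above) =====
theorem format_catalog_product_spec : Claim_equal_format_catalog_product := by
  intro dq idf _
  unfold Spec_format_catalog_product
  simp only [format_catalog_product, format_catalog_product_alt]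
  have hfold : (List.foldl (fun acc item =>
        let w := (PySem.Dict.mk item).getD idf ""
        if w ∉ acc ∧ w ≠ "" then acc ++ [w] else acc) [] dq)
      = PySem.Set.ofList ((dq.map (fun item => (PySem.Dict.mk item).getD idf "")).filter
          (fun v => v ≠ "")) := by
    rw [← pv_afold_eq_ofList]
    rw [List.foldl_map]
  rw [hfold]
  set vals := (dq.map (fun item => (PySem.Dict.mk item).getD idf "")).filter
    (fun v => v ≠ "") with hvals
  have hsp : (PySem.List.sorted vals (fun x => x) false).Pairwise (· ≤ ·) :=
    PySem.List.sorted_pairwise vals (fun x => x)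
  have hB := pv_bfold_spec (PySem.List.sorted vals (fun x => x) false) [] hsp
    (by simp) (by intro a ha; cases ha)
  set r := (PySem.List.sorted vals (fun x => x) false).foldl
    (fun out v => if out = [] ∨ out.getLast? ≠ some v then out ++ [v] else out) [] with hr
  have hrlt : r.Pairwise (· < ·) := hB.1
  have hrmem : ∀ x, x ∈ r ↔ x ∈ vals := by
    intro x
    rw [hB.2 x]
    simp [PySem.List.mem_sorted]
  have hperm : r.Perm (PySem.Set.ofList vals) := by
    rw [List.perm_ext_iff_of_nodup (hrlt.imp ne_of_lt) (PySem.Set.nodup_ofList vals)]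
    intro a
    rw [hrmem a, PySem.Set.mem_ofList]
  exact PySem.List.sorted_eq_of_perm_of_pairwise_lt _ r (fun x => x) hperm hrlt
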